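-- pv_equiv track=rewrite | github.com/janjanssen-ship-it/iran_krieg_daily | scripts/process_strikes.py | actor_slug
-- ===== SOURCE A (Python) =====
-- import unicodedata
--
-- def actor_slug(actor: str) -> str:
--     normalized = unicodedata.normalize("NFKD", actor.strip().lower())
--     ascii_only = normalized.encode("ascii", "ignore").decode("ascii")
--     cleaned = []
--     previous_was_sep = False
--     for char in ascii_only:
--         if char.isalnum():
--             cleaned.append(char)
--             previous_was_sep = False
--         elif not previous_was_sep:
--             cleaned.append("_")
--             previous_was_sep = True
--     return "".join(cleaned).strip("_") or "unknown_actor"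
-- ===== SOURCE B (Python) =====
-- import unicodedata
--
-- def actor_slug(actor: str) -> str:
--     normalized = unicodedata.normalize("NFKD", actor.strip().lower())
--     ascii_only = normalized.encode("ascii", "ignore").decode("ascii")
--     words = "".join(c if c.isalnum() else " " for c in ascii_only).split()
--     return "_".join(words) or "unknown_actor"
-- ===== Notes on version B (the rewrite author's own statement) =====
-- stated objective: idiomatic
-- what changed: Replaces A's stateful per-character loop (previous_was_sep flag, char-list accumulator, final underscore strip) by staged passes: map every non-alphanumeric character to a space, tokenize with str.split(), and join the words with underscores, which makes the trailing strip unnecessary.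
import Mathlib
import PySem

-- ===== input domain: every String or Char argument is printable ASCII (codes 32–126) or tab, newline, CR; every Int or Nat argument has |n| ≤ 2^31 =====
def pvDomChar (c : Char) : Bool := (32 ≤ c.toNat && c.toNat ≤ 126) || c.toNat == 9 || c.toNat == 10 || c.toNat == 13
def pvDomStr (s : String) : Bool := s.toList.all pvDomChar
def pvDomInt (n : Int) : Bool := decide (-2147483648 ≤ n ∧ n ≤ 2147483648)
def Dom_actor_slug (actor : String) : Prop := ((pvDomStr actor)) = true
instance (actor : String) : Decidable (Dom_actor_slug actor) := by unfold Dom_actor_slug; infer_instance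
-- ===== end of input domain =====

-- B replaces A's stateful per-character loop (previous_was_sep flag + final underscore strip)
-- by staged passes: blank out non-alphanumerics, split() into words, join with underscores; idiomatic, same behaviour.
-- On the ASCII domain, NFKD normalization and encode("ascii","ignore").decode("ascii")
-- are the identity (ASCII is NFKD-invariant), so both ports omit that no-op step; this is exact on Dom.

-- ===== PORT A =====
-- the explicit for-loop with its previous_was_sep flag
def aLoop : List Char → Bool → List Char
  | [], _ => []
  | c :: rest, prev =>
    if PySem.Chars.isalnum c then c :: aLoop rest false
    else if !prev then '_' :: aLoop rest true
    else aLoop rest true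

def actor_slug (actor : String) : String :=
  let asciiOnly := PySem.Chars.lower (PySem.Chars.strip actor.toList)
  let cleaned := aLoop asciiOnly false
  let stripped := PySem.Chars.stripChars cleaned ['_']
  if stripped = [] then "unknown_actor" else String.ofList stripped

-- ===== PORT B =====
-- staged passes: map non-alnum chars to ' ', str.split() into words, join with '_'
def actor_slug_alt (actor : String) : String :=
  let asciiOnly := PySem.Chars.lower (PySem.Chars.strip actor.toList)
  let blanked := asciiOnly.map (fun c => if PySem.Chars.isalnum c then c else ' ')
  let words := PySem.Chars.split₀ blanked
  let joined := PySem.Chars.join ['_'] words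
  if joined = [] then "unknown_actor" else String.ofList joined

-- ===== PRECONDITION & SPEC =====
def Spec_actor_slug (actor : String) (out : String) : Prop := out = actor_slug_alt actor
instance (actor : String) (out : String) : Decidable (Spec_actor_slug actor out) := by unfold Spec_actor_slug; infer_instance

-- ===== CLAIM (what is proved, stated in full; the proofs are below) =====
def Claim_equal_actor_slug : Prop := ∀ (actor : String), Dom_actor_slug actor → Spec_actor_slug actor (actor_slug actor)

-- ===== LEMMAS AND PROOFS =====

-- the maximal alphanumeric runs of a character list (common reference form for both ports)
def pvWords : List Char → List (List Char)
  | [] => []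
  | c :: rest =>
    if PySem.Chars.isalnum c then
      (c :: rest.takeWhile PySem.Chars.isalnum) :: pvWords (rest.dropWhile PySem.Chars.isalnum)
    else pvWords rest
termination_by xs => xs.length
decreasing_by
  · have := List.length_dropWhile_le PySem.Chars.isalnum rest
    simp; omega
  · simp

-- whitespace tokenizer (reference form of str.split())
def pvWtok : List Char → List (List Char)
  | [] => []
  | c :: rest =>
    if PySem.Chars.isspace c then pvWtok rest
    else (c :: rest.takeWhile (fun d => !PySem.Chars.isspace d)) ::
         pvWtok (rest.dropWhile (fun d => !PySem.Chars.isspace d))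
termination_by xs => xs.length
decreasing_by
  · simp
  · have := List.length_dropWhile_le (fun d => !PySem.Chars.isspace d) rest
    simp; omega

theorem alnum_not_space (c : Char) (h : PySem.Chars.isalnum c = true) :
    PySem.Chars.isspace c = false := by
  unfold PySem.Chars.isalnum PySem.Chars.isalpha PySem.Chars.isdigit PySem.Chars.islower PySem.Chars.isupper at h
  unfold PySem.Chars.isspace
  simp only [Bool.or_eq_true, Bool.and_eq_true, decide_eq_true_eq, Char.le_def,
    UInt32.le_iff_toNat_le, Char.toNat, Bool.or_eq_false_iff, Bool.and_eq_false_iff,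
    decide_eq_false_iff_not, not_le] at h ⊢
  have e1 : 'A'.val.toNat = 65 := rfl
  have e2 : 'Z'.val.toNat = 90 := rfl
  have e3 : 'a'.val.toNat = 97 := rfl
  have e4 : 'z'.val.toNat = 122 := rfl
  have e5 : '0'.val.toNat = 48 := rfl
  have e6 : '9'.val.toNat = 57 := rfl
  omega

theorem alnum_ne_underscore (c : Char) (h : PySem.Chars.isalnum c = true) : ¬ (c = '_') := by
  intro hc; subst hc
  simp [PySem.Chars.isalnum, PySem.Chars.isalpha, PySem.Chars.isdigit,
        PySem.Chars.islower, PySem.Chars.isupper] at h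

-- split₀.go characterized by the tokenizer
theorem go_eq_wtok (ys : List Char) : ∀ (cur : List Char) (acc : List (List Char)),
    PySem.Chars.split₀.go ys cur acc =
      acc.reverse ++ (if cur.isEmpty then pvWtok ys
        else (cur.reverse ++ ys.takeWhile (fun d => !PySem.Chars.isspace d)) ::
             pvWtok (ys.dropWhile (fun d => !PySem.Chars.isspace d))) := by
  induction ys with
  | nil =>
    intro cur acc
    cases cur with
    | nil => simp [PySem.Chars.split₀.go, pvWtok]
    | cons a t => simp [PySem.Chars.split₀.go, pvWtok]
  | cons c rest ih =>
    intro cur acc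
    by_cases hs : PySem.Chars.isspace c = true
    · cases cur with
      | nil =>
        rw [pvWtok, if_pos hs]
        simp [PySem.Chars.split₀.go, hs, ih [] acc]
      | cons a t =>
        rw [PySem.Chars.split₀.go]
        simp only [hs, if_true, List.isEmpty_cons, if_neg (by simp : ¬((a :: t).isEmpty = true))]
        rw [if_neg (by decide)]
        rw [ih [] ((a :: t).reverse :: acc)]
        simp [List.takeWhile_cons, List.dropWhile_cons, hs, pvWtok]
    · simp only [Bool.not_eq_true] at hs
      rw [PySem.Chars.split₀.go]
      simp only [hs, Bool.false_eq_true, if_false]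
      rw [ih (c :: cur) acc]
      cases cur with
      | nil => simp [pvWtok, hs, List.takeWhile_cons, List.dropWhile_cons]
      | cons a t => simp [pvWtok, hs, List.takeWhile_cons, List.dropWhile_cons]

theorem split₀_eq_wtok (ys : List Char) : PySem.Chars.split₀ ys = pvWtok ys := by
  have := go_eq_wtok ys [] []
  simpa [PySem.Chars.split₀] using this

-- blanking non-alnum chars to spaces turns the whitespace tokenizer into the alnum-run tokenizer
theorem wtok_map_blank : ∀ (n : ℕ) (xs : List Char), xs.length ≤ n →
    pvWtok (xs.map (fun c => if PySem.Chars.isalnum c then c else ' ')) = pvWords xs := by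
  intro n
  induction n with
  | zero =>
    intro xs h
    cases xs with
    | nil => simp [pvWtok, pvWords]
    | cons a t => simp at h
  | succ n ih =>
    intro xs h
    cases xs with
    | nil => simp [pvWtok, pvWords]
    | cons c rest =>
      simp only [List.length_cons] at h
      set f : Char → Char := (fun c => if PySem.Chars.isalnum c then c else ' ') with hf
      have hpred : (fun d => !PySem.Chars.isspace (f d)) = PySem.Chars.isalnum := by
        funext d
        by_cases hd : PySem.Chars.isalnum d = true
        · simp [hf, hd, alnum_not_space d hd]
        · simp only [Bool.not_eq_true] at hd
          simp [hf, hd]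
          decide
      by_cases hc : PySem.Chars.isalnum c = true
      · have hcs : PySem.Chars.isspace c = false := alnum_not_space c hc
        have hid : (rest.takeWhile PySem.Chars.isalnum).map f = rest.takeWhile PySem.Chars.isalnum := by
          have : ∀ d ∈ rest.takeWhile PySem.Chars.isalnum, f d = d := by
            intro d hd
            simp [hf, List.mem_takeWhile_imp hd]
          rw [List.map_congr_left this]
          simp
        have hlen : (rest.dropWhile PySem.Chars.isalnum).length ≤ n := by
          have := List.length_dropWhile_le PySem.Chars.isalnum rest
          omega
        rw [List.map_cons]
        rw [show f c = c from by simp [hf, hc]]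
        rw [pvWtok, if_neg (by simp [hcs]), pvWords, if_pos hc]
        rw [List.takeWhile_map, List.dropWhile_map]
        rw [show ((fun d => !PySem.Chars.isspace d) ∘ f) = (fun d => !PySem.Chars.isspace (f d)) from rfl]
        rw [hpred, hid, ih _ hlen]
      · simp only [Bool.not_eq_true] at hc
        rw [List.map_cons, show f c = ' ' from by simp [hf, hc]]
        rw [pvWtok, if_pos (by decide), pvWords, if_neg (by simp [hc])]
        exact ih rest (by omega)

-- A's flag loop rewritten as run-collapsing recursion
def pvBRun : List Char → List Char
  | [] => []
  | c :: rest =>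
    if PySem.Chars.isalnum c then c :: pvBRun rest
    else '_' :: pvBRun (rest.dropWhile (fun d => !PySem.Chars.isalnum d))
termination_by xs => xs.length
decreasing_by
  · simp
  · have := List.length_dropWhile_le (fun d => !PySem.Chars.isalnum d) rest
    simp; omega

theorem aLoop_eq_pvBRun (xs : List Char) :
    aLoop xs false = pvBRun xs ∧
    aLoop xs true = pvBRun (xs.dropWhile (fun d => !PySem.Chars.isalnum d)) := by
  induction xs with
  | nil => simp [aLoop, pvBRun]
  | cons c rest ih =>
    by_cases h : PySem.Chars.isalnum c = true
    · constructor
      · simp [aLoop, pvBRun, h, ih.1]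
      · simp [aLoop, pvBRun, List.dropWhile, h, ih.1]
    · simp only [Bool.not_eq_true] at h
      constructor
      · simp [aLoop, pvBRun, h, ih.2]
      · simp [aLoop, List.dropWhile, h, ih.2]

-- an alphanumeric run is peeled off pvBRun whole
theorem pvBRun_run : ∀ (rest : List Char) (c : Char), PySem.Chars.isalnum c = true →
    pvBRun (c :: rest) =
      (c :: rest.takeWhile PySem.Chars.isalnum) ++ pvBRun (rest.dropWhile PySem.Chars.isalnum) := by
  intro rest
  induction rest with
  | nil => intro c hc; simp [pvBRun, hc]
  | cons d t ih =>
    intro c hc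
    by_cases hd : PySem.Chars.isalnum d = true
    · rw [pvBRun, if_pos hc, ih d hd]
      simp [List.takeWhile_cons, List.dropWhile_cons, hd]
    · rw [pvBRun, if_pos hc]
      simp [List.takeWhile_cons, List.dropWhile_cons, hd]

-- right strip of underscores
def pvRstrip (s : List Char) : List Char :=
  (s.reverse.dropWhile (fun c => (['_'] : List Char).contains c)).reverse

theorem pvRstrip_append (a b : List Char) :
    pvRstrip (a ++ b) = if pvRstrip b = [] then pvRstrip a else a ++ pvRstrip b := by
  by_cases hb : (b.reverse.dropWhile (fun c => (['_'] : List Char).contains c)) = []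
  · have hpb : pvRstrip b = [] := by unfold pvRstrip; rw [hb]; rfl
    rw [if_pos hpb]
    unfold pvRstrip
    rw [List.reverse_append, List.dropWhile_append, if_pos (by rw [List.isEmpty_iff]; exact hb)]
  · have hpb : pvRstrip b ≠ [] := by unfold pvRstrip; simpa using hb
    rw [if_neg hpb]
    unfold pvRstrip
    rw [List.reverse_append, List.dropWhile_append, if_neg (by simpa [List.isEmpty_iff] using hb),
        List.reverse_append, List.reverse_reverse]

theorem pvRstrip_underscore_cons (t : List Char) :
    pvRstrip ('_' :: t) = if pvRstrip t = [] then [] else '_' :: pvRstrip t := by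
  have h := pvRstrip_append ['_'] t
  simp only [List.singleton_append] at h
  rw [h]
  have h1 : pvRstrip ['_'] = [] := by decide
  split_ifs <;> simp [h1]

theorem pvRstrip_alnum (w : List Char) (hw : ∀ c ∈ w, PySem.Chars.isalnum c = true)
    (hne : w ≠ []) : pvRstrip w = w := by
  unfold pvRstrip
  cases hrev : w.reverse with
  | nil => exact absurd (by simpa using hrev) hne
  | cons a t =>
    have ha : a ∈ w := by
      have : a ∈ w.reverse := by rw [hrev]; exact List.mem_cons_self
      simpa using this
    rw [List.dropWhile_cons_of_neg]
    · rw [← hrev, List.reverse_reverse]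
    · simp [alnum_ne_underscore a (hw a ha)]

theorem pvWords_mem : ∀ (n : ℕ) (xs : List Char), xs.length ≤ n →
    ∀ w ∈ pvWords xs, w ≠ [] ∧ ∀ c ∈ w, PySem.Chars.isalnum c = true := by
  intro n
  induction n with
  | zero =>
    intro xs h
    cases xs with
    | nil => simp [pvWords]
    | cons a t => simp at h
  | succ n ih =>
    intro xs h w hw
    cases xs with
    | nil => simp [pvWords] at hw
    | cons c rest =>
      simp only [List.length_cons] at h
      by_cases hc : PySem.Chars.isalnum c = true
      · rw [pvWords, if_pos hc] at hw
        rcases List.mem_cons.mp hw with h1 | h1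
        · subst h1
          refine ⟨by simp, ?_⟩
          intro d hd
          rcases List.mem_cons.mp hd with h2 | h2
          · subst h2; exact hc
          · exact List.mem_takeWhile_imp h2
        · have hlen : (rest.dropWhile PySem.Chars.isalnum).length ≤ n := by
            have := List.length_dropWhile_le PySem.Chars.isalnum rest; omega
          exact ih _ hlen w h1
      · rw [pvWords, if_neg hc] at hw
        exact ih rest (by omega) w hw

theorem intercalate_ne_nil (w : List Char) (ws : List (List Char)) (hw : w ≠ []) :
    (['_'] : List Char).intercalate (w :: ws) ≠ [] := by
  cases ws with
  | nil => simpa [List.intercalate] using hw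
  | cons w' ws' =>
    simp only [List.intercalate, List.intersperse, List.flatten]
    intro h
    rcases List.append_eq_nil_iff.mp h with ⟨h1, _⟩
    exact hw h1

theorem intercalate_cons_cons (w w' : List Char) (ws : List (List Char)) :
    (['_'] : List Char).intercalate (w :: w' :: ws)
      = w ++ '_' :: (['_'] : List Char).intercalate (w' :: ws) := by
  simp [List.intercalate, List.intersperse]

-- dropping a non-alnum prefix does not change the words
theorem pvWords_dropWhile (rest : List Char) :
    pvWords (rest.dropWhile (fun d => !PySem.Chars.isalnum d)) = pvWords rest := by
  induction rest with
  | nil => simp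
  | cons d t ih =>
    by_cases hd : PySem.Chars.isalnum d = true
    · simp [List.dropWhile_cons, hd]
    · simp only [Bool.not_eq_true] at hd
      rw [List.dropWhile_cons]
      simp only [hd, Bool.not_false, if_true]
      rw [ih, pvWords, if_neg (by simp [hd])]

theorem dropWhile_head_not {q : Char → Bool} : ∀ (l : List Char) (d : Char) (t : List Char),
    l.dropWhile q = d :: t → q d = false := by
  intro l
  induction l with
  | nil => intro d t h; simp [List.dropWhile] at h
  | cons a s ih =>
    intro d t h
    rw [List.dropWhile_cons] at h
    by_cases ha : q a = true
    · rw [if_pos ha] at h; exact ih d t h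
    · simp only [Bool.not_eq_true] at ha
      rw [if_neg (by simp [ha])] at h
      cases h; simpa using ha

-- the possible leading underscore of the run-collapsed list
def pvLead (xs : List Char) : List Char :=
  match xs with
  | [] => []
  | c :: _ => if PySem.Chars.isalnum c then [] else ['_']

-- the right-stripped run-collapsed list: the intercalation of the words, plus a possible leading '_'
theorem pvRstrip_pvBRun : ∀ (n : ℕ) (xs : List Char), xs.length ≤ n →
    pvRstrip (pvBRun xs) =
      if pvWords xs = [] then []
      else pvLead xs ++ (['_'] : List Char).intercalate (pvWords xs) := by
  intro n
  induction n with
  | zero =>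
    intro xs h
    cases xs with
    | nil => simp [pvBRun, pvWords, pvRstrip]
    | cons a t => simp at h
  | succ n ih =>
    intro xs h
    cases xs with
    | nil => simp [pvBRun, pvWords, pvRstrip]
    | cons c rest =>
      simp only [List.length_cons] at h
      by_cases hc : PySem.Chars.isalnum c = true
      · -- a word is peeled off
        set w : List Char := c :: rest.takeWhile PySem.Chars.isalnum with hwdef
        set rest' : List Char := rest.dropWhile PySem.Chars.isalnum with hrdef
        have hwall : ∀ d ∈ w, PySem.Chars.isalnum d = true := by
          intro d hd
          rcases List.mem_cons.mp hd with h1 | h1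
          · subst h1; exact hc
          · exact List.mem_takeWhile_imp h1
        have hwne : pvRstrip w = w := pvRstrip_alnum w hwall (by simp [hwdef])
        have hlen : rest'.length ≤ n := by
          have := List.length_dropWhile_le PySem.Chars.isalnum rest
          rw [hrdef]; omega
        have hbrun : pvBRun (c :: rest) = w ++ pvBRun rest' := pvBRun_run rest c hc
        have hwords : pvWords (c :: rest) = w :: pvWords rest' := by
          rw [pvWords, if_pos hc]
        rw [hbrun, hwords, pvRstrip_append, ih rest' hlen]
        by_cases hwr : pvWords rest' = []
        · simp [hwr, hwne, pvLead, hc, List.intercalate]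
        · -- rest' is nonempty with a non-alnum head
          cases hre : rest' with
          | nil => rw [hre] at hwr; simp [pvWords] at hwr
          | cons d t =>
            have hd : PySem.Chars.isalnum d = false :=
              dropWhile_head_not (q := PySem.Chars.isalnum) rest d t (by rw [← hrdef, hre])
            rw [hre] at hwr
            cases hwre : pvWords (d :: t) with
            | nil => exact absurd hwre hwr
            | cons w' ws' =>
              simp [pvLead, hd, hc, intercalate_cons_cons]
      · -- a separator run; one '_' is emitted and later stripped from the left or kept
        simp only [Bool.not_eq_true] at hc
        set rest'' : List Char := rest.dropWhile (fun d => !PySem.Chars.isalnum d) with hrdef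
        have hlen : rest''.length ≤ n := by
          have := List.length_dropWhile_le (fun d => !PySem.Chars.isalnum d) rest
          rw [hrdef]; omega
        have hbrun : pvBRun (c :: rest) = '_' :: pvBRun rest'' := by
          rw [pvBRun, if_neg (by simp [hc])]
        have hwords : pvWords (c :: rest) = pvWords rest'' := by
          rw [pvWords, if_neg (by simp [hc]), hrdef, pvWords_dropWhile]
        have hlead : pvLead rest'' = [] := by
          cases hre : rest'' with
          | nil => rfl
          | cons d t =>
            have hd := dropWhile_head_not (q := fun d => !PySem.Chars.isalnum d) rest d t
              (by rw [← hrdef, hre])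
            have hd' : PySem.Chars.isalnum d = true := by simpa using hd
            simp [pvLead, hd']
        rw [hbrun, pvRstrip_underscore_cons, ih rest'' hlen, hwords]
        by_cases hwr : pvWords rest'' = []
        · simp [hwr]
        · cases hwre : pvWords rest'' with
          | nil => exact absurd hwre hwr
          | cons w' ws' =>
            have hw' : w' ≠ [] :=
              (pvWords_mem rest''.length rest'' le_rfl w'
                (by rw [hwre]; exact List.mem_cons_self)).1
            rw [hlead]
            simp [pvLead, hc, intercalate_ne_nil w' ws' hw']

-- final A-side characterization
theorem stripChars_pvBRun (xs : List Char) :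
    PySem.Chars.stripChars (pvBRun xs) ['_'] = (['_'] : List Char).intercalate (pvWords xs) := by
  have hstrip : ∀ s : List Char, PySem.Chars.stripChars s ['_']
      = pvRstrip (s.dropWhile (fun c => (['_'] : List Char).contains c)) := by
    intro s; rfl
  cases xs with
  | nil => simp [pvBRun, pvWords, PySem.Chars.stripChars, List.intercalate]
  | cons c rest =>
    by_cases hc : PySem.Chars.isalnum c = true
    · rw [hstrip]
      have hbr : pvBRun (c :: rest) = c :: pvBRun rest := by rw [pvBRun, if_pos hc]
      rw [hbr, List.dropWhile_cons_of_neg (by simp [alnum_ne_underscore c hc]), ← hbr]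
      rw [pvRstrip_pvBRun (c :: rest).length _ le_rfl]
      by_cases hw : pvWords (c :: rest) = []
      · rw [if_pos hw, hw]; simp [List.intercalate]
      · rw [if_neg hw]
        simp [pvLead, hc]
    · simp only [Bool.not_eq_true] at hc
      rw [hstrip]
      set rest'' : List Char := rest.dropWhile (fun d => !PySem.Chars.isalnum d) with hrdef
      have hbr : pvBRun (c :: rest) = '_' :: pvBRun rest'' := by
        rw [pvBRun, if_neg (by simp [hc])]
      have hwords : pvWords (c :: rest) = pvWords rest'' := by
        rw [pvWords, if_neg (by simp [hc]), hrdef, pvWords_dropWhile]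
      rw [hbr, List.dropWhile_cons_of_pos (by decide)]
      have hdrop : (pvBRun rest'').dropWhile (fun c => (['_'] : List Char).contains c)
          = pvBRun rest'' := by
        cases hre : rest'' with
        | nil => simp [pvBRun]
        | cons d t =>
          have hd := dropWhile_head_not (q := fun d => !PySem.Chars.isalnum d) rest d t
            (by rw [← hrdef, hre])
          have hd' : PySem.Chars.isalnum d = true := by simpa using hd
          rw [pvBRun, if_pos hd']
          rw [List.dropWhile_cons_of_neg (by simp [alnum_ne_underscore d hd'])]
      have hlead : pvLead rest'' = [] := by
        cases hre : rest'' with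
        | nil => rfl
        | cons d t =>
          have hd := dropWhile_head_not (q := fun d => !PySem.Chars.isalnum d) rest d t
            (by rw [← hrdef, hre])
          have hd' : PySem.Chars.isalnum d = true := by simpa using hd
          simp [pvLead, hd']
      rw [hdrop, pvRstrip_pvBRun rest''.length _ le_rfl, hwords]
      by_cases hw : pvWords rest'' = []
      · rw [if_pos hw, hw]; simp [List.intercalate]
      · rw [if_neg hw, hlead, List.nil_append]

-- ===== VERDICT (by name: the statement is the Claim_ definition above) =====
theorem actor_slug_spec : Claim_equal_actor_slug := by
  intro actor _
  unfold Spec_actor_slug actor_slug actor_slug_alt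
  simp only []
  set ascii := PySem.Chars.lower (PySem.Chars.strip actor.toList) with ha
  have hA : PySem.Chars.stripChars (aLoop ascii false) ['_']
      = (['_'] : List Char).intercalate (pvWords ascii) := by
    rw [(aLoop_eq_pvBRun ascii).1, stripChars_pvBRun]
  have hB : PySem.Chars.join ['_']
      (PySem.Chars.split₀ (ascii.map (fun c => if PySem.Chars.isalnum c then c else ' ')))
      = (['_'] : List Char).intercalate (pvWords ascii) := by
    rw [split₀_eq_wtok, wtok_map_blank ascii.length ascii le_rfl]
    rfl
  rw [hA, hB]
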